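-- pv_equiv track=rewrite | github.com/ryqm/SovCal-GUI | CalSov-GUI.py | get_world_day_of_year
-- ===== SOURCE A (Python) =====
-- months = [
--     ("Attinia", 42),
--     ("Havenox", 41),
--     ("Iorvia", 42),
--     ("Victoria", 41),
--     ("Protopia", 42),
--     ("Gioia", 41),
--     ("Wulfrum", 42),
--     ("Tuxia", 43),
--     ("Chimpe", 41),
--     ("Ratatosqua", 42),
--     ("Odinia", 39),
--     ("Neo", 42),
-- ]
--
-- def get_world_day_of_year(month_name, day_in_month):
--     total_days = 0
--     for name, days_in_month in months:
--         if name == month_name: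
--             total_days += day_in_month
--             return total_days
--         else:
--             total_days += days_in_month
--     raise ValueError(f"Invalid month name: {month_name}")
-- ===== SOURCE B (Python) =====
-- months = [
--     ("Attinia", 42),
--     ("Havenox", 41),
--     ("Iorvia", 42),
--     ("Victoria", 41),
--     ("Protopia", 42),
--     ("Gioia", 41),
--     ("Wulfrum", 42),
--     ("Tuxia", 43),
--     ("Chimpe", 41),
--     ("Ratatosqua", 42),
--     ("Odinia", 39),
--     ("Neo", 42),
-- ]
--
-- # prefix-offset table built once at module load
-- _offsets = {}
-- _total = 0
-- for _name, _days in months: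
--     _offsets[_name] = _total
--     _total += _days
--
-- def get_world_day_of_year(month_name, day_in_month):
--     try:
--         return _offsets[month_name] + day_in_month
--     except KeyError:
--         raise ValueError(f"Invalid month name: {month_name}")
-- ===== Notes on version B (the rewrite author's own statement) =====
-- stated objective: alternative
-- what changed: Replaces the per-call scan over the month list by a prefix-offset dict built once at module load; the body is a single lookup plus addition.
import Mathlib
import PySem

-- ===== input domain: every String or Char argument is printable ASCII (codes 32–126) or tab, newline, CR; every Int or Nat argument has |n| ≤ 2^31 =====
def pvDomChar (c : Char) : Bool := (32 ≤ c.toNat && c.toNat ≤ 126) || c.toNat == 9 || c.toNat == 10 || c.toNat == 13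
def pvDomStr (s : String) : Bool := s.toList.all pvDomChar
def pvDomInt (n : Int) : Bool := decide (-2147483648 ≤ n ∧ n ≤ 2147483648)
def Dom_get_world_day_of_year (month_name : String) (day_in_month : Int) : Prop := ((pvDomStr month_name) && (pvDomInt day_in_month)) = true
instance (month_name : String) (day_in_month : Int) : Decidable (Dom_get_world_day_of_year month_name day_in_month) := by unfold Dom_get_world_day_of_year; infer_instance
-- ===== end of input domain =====

-- B replaces A's per-call scan over the month list by a prefix-offset dict built once; both raise ValueError on unknown month names (excluded by Pre_).


-- ===== PORT A =====
def pvMonths : List (String × Int) := [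
  ("Attinia", 42), ("Havenox", 41), ("Iorvia", 42), ("Victoria", 41),
  ("Protopia", 42), ("Gioia", 41), ("Wulfrum", 42), ("Tuxia", 43),
  ("Chimpe", 41), ("Ratatosqua", 42), ("Odinia", 39), ("Neo", 42)]

-- A's loop: scan the list keeping a running total; none = the ValueError path (excluded by Pre_)
def pvLoopA (month_name : String) (day_in_month : Int) : List (String × Int) → Int → Option Int
  | [], _ => none
  | (name, days_in_month) :: rest, total_days =>
      if name == month_name then some (total_days + day_in_month)
      else pvLoopA month_name day_in_month rest (total_days + days_in_month)

def get_world_day_of_year (month_name : String) (day_in_month : Int) : Int :=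
  (pvLoopA month_name day_in_month pvMonths 0).getD 0

-- ===== PORT B =====
-- Source B's module-load build of the prefix-offset dict
def pvOffsets : PySem.Dict String Int :=
  (pvMonths.foldl (fun (st : PySem.Dict String Int × Int) nd =>
      (st.1.insert nd.1 st.2, st.2 + nd.2)) (PySem.Dict.empty, 0)).1

def get_world_day_of_year_alt (month_name : String) (day_in_month : Int) : Int :=
  match pvOffsets.get? month_name with
  | some off => off + day_in_month
  | none => 0  -- ValueError path, excluded by Pre_

-- ===== PRECONDITION & SPEC =====
-- Pre_ excludes exactly the month names not in the table, on which A raises ValueError.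
def Pre_get_world_day_of_year (month_name : String) (day_in_month : Int) : Prop :=
  month_name ∈ pvMonths.map Prod.fst
instance (month_name : String) (day_in_month : Int) : Decidable (Pre_get_world_day_of_year month_name day_in_month) := by unfold Pre_get_world_day_of_year; infer_instance
def pvWitness_get_world_day_of_year : String × Int := ("Tuxia", 7)

def Spec_get_world_day_of_year (month_name : String) (day_in_month : Int) (out : Int) : Prop := out = get_world_day_of_year_alt month_name day_in_month
instance (month_name : String) (day_in_month : Int) (out : Int) : Decidable (Spec_get_world_day_of_year month_name day_in_month out) := by unfold Spec_get_world_day_of_year; infer_instance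

-- ===== CLAIM =====
def Claim_equal_get_world_day_of_year : Prop := ∀ (month_name : String) (day_in_month : Int), Dom_get_world_day_of_year month_name day_in_month → Pre_get_world_day_of_year month_name day_in_month → Spec_get_world_day_of_year month_name day_in_month (get_world_day_of_year month_name day_in_month)

-- ===== LEMMAS AND PROOFS =====

-- ===== VERDICT =====
theorem get_world_day_of_year_spec : Claim_equal_get_world_day_of_year := by
  intro m d _ hpre
  unfold Pre_get_world_day_of_year pvMonths at hpre
  simp only [List.map, List.mem_cons, List.not_mem_nil, or_false] at hpre
  unfold Spec_get_world_day_of_year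
  rcases hpre with h|h|h|h|h|h|h|h|h|h|h|h <;> subst h <;>
    simp [get_world_day_of_year, get_world_day_of_year_alt, pvLoopA, pvOffsets, pvMonths,
      PySem.Dict.get?, PySem.Dict.insert, PySem.Dict.empty]
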